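-- pv_equiv track=rewrite | github.com/ztogoc/laliga-app | scripts/hipervinculos.py | estructurar_por_equipo
-- ===== SOURCE A (Python) =====
-- def estructurar_por_equipo(links):
--     """Agrupa los links por equipo"""
--     equipos_data = {}
--
--     for link in links:
--         equipo_nombre = link['equipo']
--
--         if equipo_nombre not in equipos_data:
--             equipos_data[equipo_nombre] = []
--
--         equipos_data[equipo_nombre].append({
--             'url': link['url'],
--             'fecha': link['fecha'],
--             'titulo': link['titulo']
--         })
--
--     return equipos_data
-- ===== SOURCE B (Python) =====
-- def estructurar_por_equipo(links):
--     """Agrupa los links por equipo: first collect the distinct team names in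
--     order of first appearance, then build each team's list with one filtering
--     pass per team (two-phase dedup+filter instead of hash-bucket appends)."""
--     orden = []
--     vistos = set()
--     for link in links:
--         equipo = link['equipo']
--         if equipo not in vistos:
--             vistos.add(equipo)
--             orden.append(equipo)
--     return {
--         equipo: [
--             {'url': l['url'], 'fecha': l['fecha'], 'titulo': l['titulo']}
--             for l in links if l['equipo'] == equipo
--         ]
--         for equipo in orden
--     }
-- ===== Notes on version B (the rewrite author's own statement) =====
-- stated objective: alternative
-- what changed: Replaces the single-pass hash-bucket append loop with a two-phase scheme: one pass dedups the team names in first-appearance order, then a dict comprehension builds each team's group by filtering the whole list per team.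
import Mathlib
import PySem

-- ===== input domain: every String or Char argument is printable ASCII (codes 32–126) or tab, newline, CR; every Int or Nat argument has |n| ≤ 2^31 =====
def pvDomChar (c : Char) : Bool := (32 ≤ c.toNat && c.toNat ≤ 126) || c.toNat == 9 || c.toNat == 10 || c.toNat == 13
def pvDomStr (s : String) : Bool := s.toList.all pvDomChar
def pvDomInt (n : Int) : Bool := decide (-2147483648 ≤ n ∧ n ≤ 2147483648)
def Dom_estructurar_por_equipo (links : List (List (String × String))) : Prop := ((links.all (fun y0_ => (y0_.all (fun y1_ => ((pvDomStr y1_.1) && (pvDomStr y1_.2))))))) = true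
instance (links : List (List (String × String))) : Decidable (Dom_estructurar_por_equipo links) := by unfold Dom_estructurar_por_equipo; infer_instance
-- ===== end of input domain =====

-- B groups links by team in two phases (dedup the team names in first-appearance order, then one filter pass per team) instead of A's single hash-bucket append loop; alternative structure, same result.


-- ===== PORT A =====
-- link[k]: first-match lookup; Python raises KeyError when absent (excluded by Pre_), the "" default is never reached inside Pre_
def pvGetKey (link : List (String × String)) (k : String) : String :=
  ((PySem.Dict.mk link).get? k).getD ""

-- the inner dict {'url': …, 'fecha': …, 'titulo': …}
def pvProj (link : List (String × String)) : List (String × String) :=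
  [("url", pvGetKey link "url"), ("fecha", pvGetKey link "fecha"), ("titulo", pvGetKey link "titulo")]

def estructurar_por_equipo (links : List (List (String × String))) : List (String × List (List (String × String))) :=
  (links.foldl (fun d link =>
      let equipo_nombre := pvGetKey link "equipo"
      let d' := if d.contains equipo_nombre then d else d.insert equipo_nombre []
      d'.modify equipo_nombre [] (fun xs => xs ++ [pvProj link]))
    PySem.Dict.empty).items

-- ===== PORT B =====
def estructurar_por_equipo_alt (links : List (List (String × String))) : List (String × List (List (String × String))) :=
  let st := links.foldl (fun (st : List String × PySem.Set String) link =>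
      let equipo := pvGetKey link "equipo"
      if st.2.contains equipo then st else (st.1 ++ [equipo], st.2.add equipo))
    ([], PySem.Set.empty)
  st.1.map (fun equipo =>
    (equipo, (links.filter (fun l => pvGetKey l "equipo" == equipo)).map pvProj))

-- ===== PRECONDITION & SPEC =====
-- Pre_ excludes links missing any of the keys 'equipo'/'url'/'fecha'/'titulo': Python A raises KeyError there.
def Pre_estructurar_por_equipo (links : List (List (String × String))) : Prop :=
  (links.all (fun l => (l.map Prod.fst).contains "equipo" && (l.map Prod.fst).contains "url" &&
                       (l.map Prod.fst).contains "fecha" && (l.map Prod.fst).contains "titulo")) = true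
instance (links : List (List (String × String))) : Decidable (Pre_estructurar_por_equipo links) := by unfold Pre_estructurar_por_equipo; infer_instance

def pvWitness_estructurar_por_equipo : (List (List (String × String))) :=
  [[("equipo", "A"), ("url", "u1"), ("fecha", "d1"), ("titulo", "t1")],
   [("equipo", "B"), ("url", "u2"), ("fecha", "d2"), ("titulo", "t2")],
   [("equipo", "A"), ("url", "u3"), ("fecha", "d3"), ("titulo", "t3")]]

def Spec_estructurar_por_equipo (links : List (List (String × String))) (out : List (String × List (List (String × String)))) : Prop := out = estructurar_por_equipo_alt links
instance (links : List (List (String × String))) (out : List (String × List (List (String × String)))) : Decidable (Spec_estructurar_por_equipo links out) := by unfold Spec_estructurar_por_equipo; infer_instance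

-- ===== CLAIM (what is proved, stated in full; the proofs are below) =====
def Claim_equal_estructurar_por_equipo : Prop := ∀ (links : List (List (String × String))), Dom_estructurar_por_equipo links → Pre_estructurar_por_equipo links → Spec_estructurar_por_equipo links (estructurar_por_equipo links)

-- ===== LEMMAS AND PROOFS =====

-- A's step (insert [] when absent, then append) is exactly one 'modify … [] (· ++ [v])'
theorem stepA_eq_modify (d : PySem.Dict String (List (List (String × String))))
    (e : String) (v : List (String × String)) :
    (if d.contains e then d else d.insert e []).modify e [] (fun xs => xs ++ [v])
      = d.modify e [] (fun xs => xs ++ [v]) := by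
  by_cases h : d.contains e
  · simp [h]
  · simp only [h]
    have hk : ∀ p ∈ d.items, p.1 ≠ e := by
      intro p hp he
      exact absurd ((PySem.Dict.contains_iff_mem_keys d e).2
        (he ▸ PySem.Dict.mem_keys_of_mem_items (d := d) hp)) h
    have hins : (d.insert e ([] : List (List (String × String))))
        = { items := d.items ++ [(e, [])] } := by
      simp [PySem.Dict.insert, h]
    simp [PySem.Dict.modify, PySem.Dict.insert, h]
    constructor
    · conv_rhs => rw [← List.map_id d.items]
      exact List.map_congr_left (fun p hp => by simp [hk p hp])
    · rw [← hins, PySem.Dict.getD_insert_self]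
      rw [PySem.Dict.getD_of_not_contains (h := by simpa using h)]

-- A's dict is the plain grouping fold keyed by pvGetKey · "equipo"
theorem foldA_eq (links : List (List (String × String))) :
    links.foldl (fun d link =>
        let equipo_nombre := pvGetKey link "equipo"
        let d' := if d.contains equipo_nombre then d else d.insert equipo_nombre []
        d'.modify equipo_nombre [] (fun xs => xs ++ [pvProj link])) PySem.Dict.empty
      = links.foldl (fun d link =>
          d.modify (pvGetKey link "equipo") [] (fun xs => xs ++ [pvProj link])) PySem.Dict.empty := by
  have hstep : (fun (d : PySem.Dict String (List (List (String × String)))) link =>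
      let equipo_nombre := pvGetKey link "equipo"
      let d' := if d.contains equipo_nombre then d else d.insert equipo_nombre []
      d'.modify equipo_nombre [] (fun xs => xs ++ [pvProj link]))
        = (fun d link => d.modify (pvGetKey link "equipo") [] (fun xs => xs ++ [pvProj link])) := by
    funext d link
    exact stepA_eq_modify d (pvGetKey link "equipo") (pvProj link)
  rw [hstep]

-- B's first pass returns (orden, vistos) with orden = vistos = the teams in first-appearance order
theorem foldB_eq (links : List (List (String × String))) (s : PySem.Set String) :
    links.foldl (fun (st : List String × PySem.Set String) link =>
        let equipo := pvGetKey link "equipo"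
        if st.2.contains equipo then st else (st.1 ++ [equipo], st.2.add equipo)) (s, s)
      = (PySem.Set.update s (links.map (fun l => pvGetKey l "equipo")),
         PySem.Set.update s (links.map (fun l => pvGetKey l "equipo"))) := by
  induction links generalizing s with
  | nil => simp [PySem.Set.update]
  | cons l ls ih =>
    simp only [List.foldl_cons, List.map_cons]
    have hstep : (if (s : PySem.Set String).contains (pvGetKey l "equipo") then (s, s)
        else (s ++ [pvGetKey l "equipo"], s.add (pvGetKey l "equipo")))
          = (s.add (pvGetKey l "equipo"), s.add (pvGetKey l "equipo")) := by
      by_cases h : (s : PySem.Set String).contains (pvGetKey l "equipo")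
      · have hm := (PySem.Set.contains_iff s (pvGetKey l "equipo")).1 h
        simp [hm]
      · have hm : pvGetKey l "equipo" ∉ s :=
          fun hm => h ((PySem.Set.contains_iff s (pvGetKey l "equipo")).2 hm)
        simp [hm]
    rw [show (PySem.Set.update s (pvGetKey l "equipo" :: ls.map (fun l => pvGetKey l "equipo")))
        = PySem.Set.update (s.add (pvGetKey l "equipo")) (ls.map (fun l => pvGetKey l "equipo")) from rfl]
    exact hstep ▸ ih (s.add (pvGetKey l "equipo"))

-- each group of the fold is the per-team filter
theorem getD_foldA (links : List (List (String × String))) (c : String) :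
    (links.foldl (fun d l => d.modify (pvGetKey l "equipo") [] (fun xs => xs ++ [pvProj l]))
        PySem.Dict.empty).getD c []
      = (links.filter (fun l => pvGetKey l "equipo" == c)).map pvProj := by
  rw [show links.foldl (fun d l => d.modify (pvGetKey l "equipo") [] (fun xs => xs ++ [pvProj l])) PySem.Dict.empty
      = (links.map (fun l => (pvGetKey l "equipo", pvProj l))).foldl
          (fun d p => d.modify p.1 [] (fun xs => xs ++ [p.2])) PySem.Dict.empty
      from (List.foldl_map (f := fun l => (pvGetKey l "equipo", pvProj l))
        (g := fun d p => PySem.Dict.modify d p.1 [] (fun xs => xs ++ [p.2]))).symm]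
  rw [PySem.Dict.getD_foldl_modify_append]
  simp [List.filter_map, Function.comp_def]

-- ===== VERDICT (by name: the statement is the Claim_ definition above) =====
theorem estructurar_por_equipo_spec : Claim_equal_estructurar_por_equipo := by
  intro links _ _
  unfold Spec_estructurar_por_equipo estructurar_por_equipo estructurar_por_equipo_alt
  rw [foldA_eq]
  rw [show (([] : List String), (PySem.Set.empty : PySem.Set String))
      = ((PySem.Set.empty : PySem.Set String), (PySem.Set.empty : PySem.Set String)) from rfl]
  rw [foldB_eq links PySem.Set.empty]
  rw [PySem.Dict.items_eq_map_keys _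
    (PySem.Dict.nodup_keys_foldl_modify_key links (fun l => pvGetKey l "equipo") []
      (fun _ l xs => xs ++ [pvProj l]) PySem.Dict.empty PySem.Dict.nodup_keys_empty) []]
  rw [PySem.Dict.keys_foldl_modify_key links (fun l => pvGetKey l "equipo") []
      (fun _ l xs => xs ++ [pvProj l]) PySem.Dict.empty]
  exact List.map_congr_left (fun e _ => by rw [getD_foldA links e])
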